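-- pv_equiv track=rewrite | github.com/gsabouzeid/personal | csci_1133/hw5_Lists.py | convert
-- ===== SOURCE A (Python) =====
-- def convert(notes, up):
--     scale = ['A', 'A#', 'B', 'C', 'C#', 'D', 'D#', 'E', 'F', 'F#', 'G', 'G#']
--     new_notes = []
--     for i in range(0,len(scale)):
--         for j in range(0,len(notes)):
--             if notes[j] == scale[i]:
--                 notes[j] = scale.index(scale[i])
--                 notes[j] = (notes[j] + up) % 12
--     for k in range(0,len(notes)):
--         new_notes.append(scale[notes[k]])
--     return new_notes
-- ===== SOURCE B (Python) =====
-- # Note: unlike A, B does not mutate `notes` in place; the equivalence claimed is about the return value only.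
-- def convert(notes, up):
--     scale = ['A', 'A#', 'B', 'C', 'C#', 'D', 'D#', 'E', 'F', 'F#', 'G', 'G#']
--     index = {note: i for i, note in enumerate(scale)}
--     return [scale[(index[n] + up) % 12] for n in notes]
-- ===== Notes on version B (the rewrite author's own statement) =====
-- stated objective: faster
-- what changed: Replaces A's 12xN nested rewrite loops plus a second output pass (with a linear scale.index call inside) by one precomputed note-to-index dict and a single comprehension that maps each note directly to scale[(index[n]+up)%12]; B does not mutate notes in place (return value is identical).
import Mathlib
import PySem

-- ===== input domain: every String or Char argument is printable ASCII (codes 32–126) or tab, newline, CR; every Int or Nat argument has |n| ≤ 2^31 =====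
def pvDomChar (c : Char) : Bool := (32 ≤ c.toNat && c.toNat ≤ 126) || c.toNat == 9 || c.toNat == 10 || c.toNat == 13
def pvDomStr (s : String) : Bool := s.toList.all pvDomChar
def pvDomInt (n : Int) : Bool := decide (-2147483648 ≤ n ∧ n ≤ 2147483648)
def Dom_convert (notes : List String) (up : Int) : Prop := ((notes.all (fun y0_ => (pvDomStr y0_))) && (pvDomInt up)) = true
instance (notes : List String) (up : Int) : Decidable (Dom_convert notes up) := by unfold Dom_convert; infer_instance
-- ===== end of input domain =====

-- B replaces A's 12×N nested rewrite passes + scale.index scans by one dict lookup per note in a single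
-- comprehension; unlike A, B does not mutate `notes` in place — the equivalence proved is about the return value.

-- ===== PORT A =====
-- the scale constant both Pythons spell out
def scaleA : List String := ["A", "A#", "B", "C", "C#", "D", "D#", "E", "F", "F#", "G", "G#"]

-- Working list models Python's `notes` whose cells are overwritten by ints: String ⊕ Int.
-- The two consecutive assignments `notes[j] = scale.index(scale[i]); notes[j] = (notes[j] + up) % 12`
-- are transcribed as one pySetD of `(scale.index(scale[i]) + up) % 12` (same reads, same write target).

-- body of the inner `for j in range(0, len(notes))` loop
def passA (up i : Int) (ns : List (Sum String Int)) : List (Sum String Int) :=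
  (PySem.List.pyRange 0 (ns.length : Int) 1).foldl
    (fun ns j =>
      match PySem.List.pyGet? ns j, PySem.List.pyGet? scaleA i with
      | some (Sum.inl s), some t =>
          if s = t then
            PySem.List.pySetD ns j
              (Sum.inr (PySem.Int.mod ((((PySem.List.index? scaleA t).getD 0 : Nat) : Int) + up) 12))
          else ns
      | _, _ => ns)
    ns

-- `scale[notes[k]]`: a leftover string cell makes Python raise TypeError here — outside Pre_
def cellA (o : Option (Sum String Int)) : String :=
  match o with
  | some (Sum.inr m) => (PySem.List.pyGet? scaleA m).getD ""
  | _ => ""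

def convert (notes : List String) (up : Int) : List String :=
  let ns := (PySem.List.pyRange 0 (scaleA.length : Int) 1).foldl
    (fun ns i => passA up i ns) (notes.map Sum.inl)
  (PySem.List.pyRange 0 (ns.length : Int) 1).foldl
    (fun acc k => acc ++ [cellA (PySem.List.pyGet? ns k)]) []

-- ===== PORT B =====
def convert_alt (notes : List String) (up : Int) : List String :=
  let index : PySem.Dict String Int :=
    (PySem.List.enumerate scaleA 0).foldl (fun d p => d.insert p.2 p.1) PySem.Dict.empty
  notes.map (fun n =>
    (PySem.List.pyGet? scaleA (PySem.Int.mod ((index.get? n).getD 0 + up) 12)).getD "")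
    -- a note not in the dict makes Python raise KeyError: outside Pre_

-- ===== PRECONDITION & SPEC =====
-- Pre_ excludes exactly the inputs on which A raises: any note outside the 12-note scale is left as a
-- string by the rewrite loops and `scale[notes[k]]` then raises TypeError (B's dict lookup raises KeyError).
def Pre_convert (notes : List String) (up : Int) : Prop := ∀ n ∈ notes, n ∈ scaleA
instance (notes : List String) (up : Int) : Decidable (Pre_convert notes up) := by unfold Pre_convert; infer_instance
def pvWitness_convert : List String × Int := (["A", "C#", "A", "G#"], 27)

def Spec_convert (notes : List String) (up : Int) (out : List String) : Prop := out = convert_alt notes up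
instance (notes : List String) (up : Int) (out : List String) : Decidable (Spec_convert notes up out) := by unfold Spec_convert; infer_instance

-- ===== CLAIM (what is proved, stated in full; the proofs are below) =====
def Claim_equal_convert : Prop := ∀ (notes : List String) (up : Int), Dom_convert notes up → Pre_convert notes up → Spec_convert notes up (convert notes up)

-- ===== LEMMAS AND PROOFS =====

-- the per-cell effect of A's rewrite pass for scale position i
def gStep (up i : Int) (e : Sum String Int) : Sum String Int :=
  match PySem.List.pyGet? scaleA i with
  | some t =>
    match e with
    | Sum.inl s =>
        if s = t then
          Sum.inr (PySem.Int.mod ((((PySem.List.index? scaleA t).getD 0 : Nat) : Int) + up) 12)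
        else Sum.inl s
    | Sum.inr m => Sum.inr m
  | none => e

def setStep (g : Sum String Int → Sum String Int) (l : List (Sum String Int)) (j : Int) :
    List (Sum String Int) :=
  match PySem.List.pyGet? l j with
  | some e => PySem.List.pySetD l j (g e)
  | none => l

lemma pySetD_self (l : List (Sum String Int)) (j : Int) (e : Sum String Int)
    (h0 : 0 ≤ j) (h : PySem.List.pyGet? l j = some e) : PySem.List.pySetD l j e = l := by
  rw [PySem.List.pyGet?_of_nonneg l h0] at h
  rw [PySem.List.pySetD_of_nonneg l e h0]
  rcases List.getElem?_eq_some_iff.mp h with ⟨hj, rfl⟩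
  exact List.set_getElem_self hj

lemma foldl_setStep (g : Sum String Int → Sum String Int) :
    ∀ (m : ℕ) (ns : List (Sum String Int)), m ≤ ns.length →
      (PySem.List.pyRange 0 (m : Int) 1).foldl (setStep g) ns = (ns.take m).map g ++ ns.drop m := by
  intro m
  induction m with
  | zero => intro ns _; simp [PySem.List.pyRange_one_eq_nil le_rfl]
  | succ m ih =>
    intro ns h
    have hcast : ((m + 1 : ℕ) : Int) = (m : Int) + 1 := by push_cast; ring
    rw [hcast, PySem.List.pyRange_one_succ_right (by positivity), List.foldl_append,
      ih ns (Nat.le_of_succ_le h)]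
    have hm : m < ns.length := h
    have hlenpre : ((ns.take m).map g).length = m := by
      simp [List.length_take]; omega
    have hget : PySem.List.pyGet? ((ns.take m).map g ++ ns.drop m) (m : Int) = some ns[m] := by
      rw [PySem.List.pyGet?_of_nonneg _ (by positivity)]
      simp only [Int.toNat_natCast]
      rw [List.getElem?_append_right (by omega), hlenpre]
      simp [List.getElem?_drop, List.getElem?_eq_getElem hm]
    simp only [List.foldl_cons, List.foldl_nil, setStep, hget]
    rw [PySem.List.pySetD_of_nonneg _ _ (by positivity)]
    simp only [Int.toNat_natCast]
    have hdrop : ns.drop m = ns[m] :: ns.drop (m + 1) := List.drop_eq_getElem_cons hm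
    rw [List.set_append_right _ _ (by omega), hlenpre, Nat.sub_self, hdrop]
    rw [List.take_add_one, List.getElem?_eq_getElem hm]
    simp only [List.map_append, List.map_take, Option.toList_some, List.map_cons, List.map_nil,
      List.set_cons_zero, List.append_assoc, List.singleton_append]

lemma foldl_setStep_all (g : Sum String Int → Sum String Int) (ns : List (Sum String Int)) :
    (PySem.List.pyRange 0 (ns.length : Int) 1).foldl (setStep g) ns = ns.map g := by
  simpa using foldl_setStep g ns.length ns le_rfl

lemma passA_eq (up i : Int) (ns : List (Sum String Int)) :
    passA up i ns = ns.map (gStep up i) := by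
  unfold passA
  rw [PySem.List.foldl_congr_mem _ _ (setStep (gStep up i)) ns ?_, foldl_setStep_all]
  intro acc j hj
  have hj0 : (0 : Int) ≤ j := (PySem.List.mem_pyRange_one.mp hj).1
  unfold setStep
  cases hga : PySem.List.pyGet? acc j with
  | none => cases hsi : PySem.List.pyGet? scaleA i <;> simp
  | some e =>
    cases hsi : PySem.List.pyGet? scaleA i with
    | none => cases e <;> simp [gStep, hsi, pySetD_self acc j _ hj0 hga]
    | some t =>
      cases e with
      | inr m => simp [gStep, hsi, pySetD_self acc j _ hj0 hga]
      | inl str =>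
        by_cases hst : str = t
        · simp [gStep, hsi, hst]
        · simp [gStep, hsi, hst, pySetD_self acc j _ hj0 hga]

lemma foldl_map_comm (is : List Int) (F : Int → Sum String Int → Sum String Int) :
    ∀ ns : List (Sum String Int),
      is.foldl (fun l i => l.map (F i)) ns = ns.map (fun e => is.foldl (fun e i => F i e) e) := by
  induction is with
  | nil => intro ns; simp
  | cons i is ih => intro ns; simp [ih, List.map_map]

lemma chain_eq (up : Int) (s : String) (hs : s ∈ scaleA) :
    (PySem.List.pyRange 0 12 1).foldl (fun e i => gStep up i e) (Sum.inl s)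
      = Sum.inr (PySem.Int.mod ((((PySem.List.index? scaleA s).getD 0 : Nat) : Int) + up) 12) := by
  have hR : PySem.List.pyRange 0 12 1 = [0, 1, 2, 3, 4, 5, 6, 7, 8, 9, 10, 11] := by decide
  have e0 : PySem.List.pyGet? scaleA 0 = some "A" := by decide
  have e1 : PySem.List.pyGet? scaleA 1 = some "A#" := by decide
  have e2 : PySem.List.pyGet? scaleA 2 = some "B" := by decide
  have e3 : PySem.List.pyGet? scaleA 3 = some "C" := by decide
  have e4 : PySem.List.pyGet? scaleA 4 = some "C#" := by decide
  have e5 : PySem.List.pyGet? scaleA 5 = some "D" := by decide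
  have e6 : PySem.List.pyGet? scaleA 6 = some "D#" := by decide
  have e7 : PySem.List.pyGet? scaleA 7 = some "E" := by decide
  have e8 : PySem.List.pyGet? scaleA 8 = some "F" := by decide
  have e9 : PySem.List.pyGet? scaleA 9 = some "F#" := by decide
  have e10 : PySem.List.pyGet? scaleA 10 = some "G" := by decide
  have e11 : PySem.List.pyGet? scaleA 11 = some "G#" := by decide
  rw [hR]
  fin_cases hs <;>
    simp [gStep, e0, e1, e2, e3, e4, e5, e6, e7, e8, e9, e10, e11]

lemma out_loop (ns : List (Sum String Int)) :
    (PySem.List.pyRange 0 (ns.length : Int) 1).foldl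
      (fun acc k => acc ++ [cellA (PySem.List.pyGet? ns k)]) []
      = ns.map (fun e => cellA (some e)) := by
  rw [PySem.List.foldl_append_singleton_eq_map, List.nil_append]
  have h : ∀ k ∈ PySem.List.pyRange 0 (ns.length : Int) 1,
      cellA (PySem.List.pyGet? ns k)
        = ((fun e => cellA (some e)) ∘ fun j => PySem.List.pyGetD ns j (Sum.inl "")) k := by
    intro k hk
    obtain ⟨hk0, hk1⟩ := PySem.List.mem_pyRange_one.mp hk
    simp [PySem.List.pyGet?_eq_some_getElem ns hk0 hk1, PySem.List.pyGetD_eq_getElem ns _ hk0 hk1]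
  rw [List.map_congr_left h, ← List.map_map, PySem.List.map_pyGetD_pyRange_zero']

lemma dictB_get (s : String) (hs : s ∈ scaleA) :
    ((((PySem.List.enumerate scaleA 0).foldl (fun d p => d.insert p.2 p.1)
        PySem.Dict.empty).get? s).getD 0 : Int)
      = (((PySem.List.index? scaleA s).getD 0 : Nat) : Int) := by
  fin_cases hs <;> decide

-- ===== VERDICT (by name: the statement is the Claim_ definition above) =====
theorem convert_spec : Claim_equal_convert := by
  intro notes up _ hpre
  unfold Spec_convert
  simp only [convert, convert_alt]
  have hlen : (scaleA.length : Int) = 12 := by decide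
  rw [hlen]
  have h1 : (fun (ns : List (Sum String Int)) (i : Int) => passA up i ns)
      = fun ns i => ns.map (gStep up i) := by
    funext ns i; exact passA_eq up i ns
  rw [h1, foldl_map_comm, List.map_map, out_loop, List.map_map]
  apply List.map_congr_left
  intro s hsmem
  have hs : s ∈ scaleA := hpre s hsmem
  simp only [Function.comp_apply, chain_eq up s hs, cellA, dictB_get s hs]
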